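-- pv_equiv track=rewrite | github.com/PaddlePaddle/PaddleMIX | paddlemix/datasets/coco_vqa.py | _gen_image_id_eval
-- ===== SOURCE A (Python) =====
-- def _gen_image_id_eval(anno):
--     img_ids = {}
--     n = 0
--     for ann in anno:
--         img_id = ann["image"].split("/")[-1].strip(".jpg").split("_")[-1]
--         if img_id not in img_ids.keys():
--             img_ids[img_id] = n
--             n += 1
--     return img_ids
-- ===== SOURCE B (Python) =====
-- def _gen_image_id_eval(anno):
--     parsed = [ann["image"].split("/")[-1].strip(".jpg").split("_")[-1] for ann in anno]
--     return {p: len(set(parsed[:i])) for i, p in enumerate(parsed) if p not in parsed[:i]}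
-- ===== Notes on version B (the rewrite author's own statement) =====
-- stated objective: alternative
-- what changed: Replaces A's single pass threading a seen-dict and a manual counter by a per-element closed form: each first-occurrence id is keyed to the number of distinct parsed ids in its strictly preceding prefix (len(set(parsed[:i]))), so no counter or incremental seen-state is carried.
import Mathlib
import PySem

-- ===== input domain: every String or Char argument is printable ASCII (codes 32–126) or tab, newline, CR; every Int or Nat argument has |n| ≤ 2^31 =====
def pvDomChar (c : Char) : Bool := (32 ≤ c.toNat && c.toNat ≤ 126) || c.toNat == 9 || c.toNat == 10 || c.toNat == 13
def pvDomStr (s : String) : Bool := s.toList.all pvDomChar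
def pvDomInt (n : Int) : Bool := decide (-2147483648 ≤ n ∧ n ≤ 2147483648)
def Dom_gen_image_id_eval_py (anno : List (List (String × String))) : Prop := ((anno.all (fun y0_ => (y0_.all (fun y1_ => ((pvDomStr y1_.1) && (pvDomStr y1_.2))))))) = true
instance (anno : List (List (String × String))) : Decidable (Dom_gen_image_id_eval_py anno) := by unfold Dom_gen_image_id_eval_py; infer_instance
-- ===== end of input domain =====

-- B drops A's threaded counter/seen-dict: each first-occurrence id gets its index as a closed form,
-- the number of distinct parsed ids in the strictly preceding prefix (alternative algorithm, quadratic).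

-- ===== PORT A =====
-- shared helper: ann["image"].split("/")[-1].strip(".jpg").split("_")[-1]
-- (getD is exact under Pre_, which requires the "image" key; split? with a nonempty
--  separator is always `some` of a nonempty list, so getD [] / pyGetD (-1) are exact)
def pvParse (ann : List (String × String)) : String :=
  let s := PySem.Dict.getD ⟨ann⟩ "image" ""
  let p := PySem.List.pyGetD ((PySem.Str.split? s "/").getD []) (-1) ""
  let q := PySem.Str.stripChars p ".jpg"
  PySem.List.pyGetD ((PySem.Str.split? q "_").getD []) (-1) ""

def gen_image_id_eval_py (anno : List (List (String × String))) : List (String × Int) :=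
  (anno.foldl
    (fun (st : PySem.Dict String Int × Int) ann =>
      let img_id := pvParse ann
      if ((PySem.Dict.keys st.1).contains img_id) = false then
        (PySem.Dict.insert st.1 img_id st.2, st.2 + 1)
      else st)
    (⟨[]⟩, 0)).1.items

-- ===== PORT B =====
-- parsed[:i] with i from enumerate (i ≥ 0) is PySem.List.slice parsed none (some i);
-- the dict comprehension is the insert-fold over enumerate; len(set(..)) is PySem.Set.len ∘ ofList.
def gen_image_id_eval_py_alt (anno : List (List (String × String))) : List (String × Int) :=
  let parsed := anno.map pvParse
  ((PySem.List.enumerate parsed).foldl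
    (fun (d : PySem.Dict String Int) ip =>
      if ((PySem.List.slice parsed none (some ip.1)).contains ip.2) = false then
        PySem.Dict.insert d ip.2 (PySem.Set.len (PySem.Set.ofList (PySem.List.slice parsed none (some ip.1))))
      else d)
    ⟨[]⟩).items

-- ===== PRECONDITION & SPEC =====
-- Pre_ excludes exactly the inputs where some ann lacks the "image" key: there A raises KeyError.
def Pre_gen_image_id_eval_py (anno : List (List (String × String))) : Prop :=
  ∀ ann ∈ anno, ((ann.map Prod.fst).contains "image") = true
instance (anno : List (List (String × String))) : Decidable (Pre_gen_image_id_eval_py anno) := by unfold Pre_gen_image_id_eval_py; infer_instance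
def pvWitness_gen_image_id_eval_py : (List (List (String × String))) :=
  [[("image", "coco/val2014/COCO_val2014_000000042.jpg")], [("image", "coco/val2014/COCO_val2014_000000042.jpg")], [("image", "a_7.jpg")]]

def Spec_gen_image_id_eval_py (anno : List (List (String × String))) (out : List (String × Int)) : Prop := out = gen_image_id_eval_py_alt anno
instance (anno : List (List (String × String))) (out : List (String × Int)) : Decidable (Spec_gen_image_id_eval_py anno out) := by unfold Spec_gen_image_id_eval_py; infer_instance

-- ===== CLAIM (what is proved, stated in full; the proofs are below) =====
def Claim_equal_gen_image_id_eval_py : Prop := ∀ (anno : List (List (String × String))), Dom_gen_image_id_eval_py anno → Pre_gen_image_id_eval_py anno → Spec_gen_image_id_eval_py anno (gen_image_id_eval_py anno)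

-- ===== LEMMAS AND PROOFS =====

-- the common intended result: first-occurrence ids indexed from k
def pvIdx (l : List String) (k : Int) : List (String × Int) :=
  match l with
  | [] => []
  | x :: t => (x, k) :: pvIdx t (k + 1)

theorem pvIdx_map_fst (l : List String) (k : Int) : (pvIdx l k).map Prod.fst = l := by
  induction l generalizing k with
  | nil => rfl
  | cons x t ih => simp [pvIdx, ih]

theorem pvIdx_append_singleton (l : List String) (k : Int) (x : String) :
    pvIdx (l ++ [x]) k = pvIdx l k ++ [(x, k + l.length)] := by
  induction l generalizing k with
  | nil => simp [pvIdx]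
  | cons y t ih => simp [pvIdx, ih]; ring_nf

theorem pvIdx_contains (l : List String) (k : Int) (id : String) :
    PySem.Dict.contains (⟨pvIdx l k⟩ : PySem.Dict String Int) id = l.contains id := by
  induction l generalizing k with
  | nil => rfl
  | cons x t ih =>
    have ht := ih (k + 1)
    simp only [PySem.Dict.contains] at ht ⊢
    simp only [pvIdx, List.any_cons, ht, List.contains_cons]
    by_cases hx : x = id <;> simp [hx, Bool.beq_eq_decide_eq, eq_comm]
    exact fun h => absurd h.symm hx

-- A's loop, run from the state describing an already-seen id list l, lands on Set.update l ps
theorem pvLoop (ps : List String) (l : List String) :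
    (ps.foldl
      (fun (st : PySem.Dict String Int × Int) id =>
        if ((PySem.Dict.keys st.1).contains id) = false then
          (PySem.Dict.insert st.1 id st.2, st.2 + 1)
        else st)
      (⟨pvIdx l 0⟩, (l.length : Int)))
    = (⟨pvIdx (PySem.Set.update l ps) 0⟩, ((PySem.Set.update l ps).length : Int)) := by
  induction ps generalizing l with
  | nil => rfl
  | cons id t ih =>
    rw [List.foldl_cons]
    have hkeys : PySem.Dict.keys (⟨pvIdx l 0⟩ : PySem.Dict String Int) = l := by
      simp [PySem.Dict.keys, pvIdx_map_fst]
    have hupdc : PySem.Set.update l (id :: t) = PySem.Set.update (PySem.Set.add l id) t := by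
      simp [PySem.Set.update]
    by_cases hm : id ∈ l
    · have h : l.contains id = true := by simpa using hm
      have hupd : PySem.Set.add l id = l := by simp [PySem.Set.add, hm]
      rw [hkeys, h, if_neg (by simp), hupdc, hupd]
      exact ih l
    · have hb : l.contains id = false := by simpa using hm
      have hupd : PySem.Set.add l id = l ++ [id] := by simp [PySem.Set.add, hm]
      have hcont : PySem.Dict.contains (⟨pvIdx l 0⟩ : PySem.Dict String Int) id = false := by
        rw [pvIdx_contains, hb]
      have hins : PySem.Dict.insert (⟨pvIdx l 0⟩ : PySem.Dict String Int) id (l.length : Int)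
          = ⟨pvIdx (l ++ [id]) 0⟩ := by
        simp only [PySem.Dict.insert, hcont, Bool.false_eq_true, if_false]
        rw [pvIdx_append_singleton]
        norm_num
      rw [hkeys, hb, if_pos rfl, hins, hupdc, hupd]
      have hlen : ((l.length : Int) + 1) = (((l ++ [id]).length : Nat) : Int) := by
        simp
      rw [hlen]
      exact ih (l ++ [id])

-- B's loop: processing the suffix `rest` of `parsed = pre ++ rest` turns the dict of
-- pre's first occurrences into the dict of parsed's first occurrences
theorem pvLoopB (rest pre parsed : List String) (h : parsed = pre ++ rest) :
    ((PySem.List.enumerate rest (pre.length : Int)).foldl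
      (fun (d : PySem.Dict String Int) ip =>
        if ((PySem.List.slice parsed none (some ip.1)).contains ip.2) = false then
          PySem.Dict.insert d ip.2 (PySem.Set.len (PySem.Set.ofList (PySem.List.slice parsed none (some ip.1))))
        else d)
      ⟨pvIdx (PySem.Set.ofList pre) 0⟩)
    = ⟨pvIdx (PySem.Set.ofList parsed) 0⟩ := by
  induction rest generalizing pre with
  | nil => simp [PySem.List.enumerate, h]
  | cons p t ih =>
    rw [PySem.List.enumerate_cons, List.foldl_cons]
    have hslice : PySem.List.slice parsed none (some (pre.length : Int)) = pre := by
      rw [PySem.List.slice_to_natCast, h, List.take_left]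
    have hofl : PySem.Set.ofList (pre ++ [p]) = PySem.Set.add (PySem.Set.ofList pre) p :=
      PySem.Set.ofList_append_singleton pre p
    have hparsed : parsed = (pre ++ [p]) ++ t := by simp [h]
    have hlen1 : ((pre.length : Int) + 1) = (((pre ++ [p]).length : Nat) : Int) := by simp
    by_cases hm : p ∈ pre
    · have hc : pre.contains p = true := by simpa using hm
      have hmem : p ∈ PySem.Set.ofList pre := (PySem.Set.mem_ofList pre p).2 hm
      have hadd : PySem.Set.add (PySem.Set.ofList pre) p = PySem.Set.ofList pre := by
        simp [PySem.Set.add, hmem]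
      rw [hslice, hc, if_neg (by simp)]
      have := ih (pre ++ [p]) hparsed
      rw [hofl, hadd] at this
      rw [← hlen1] at this
      exact this
    · have hc : pre.contains p = false := by simpa using hm
      have hmem : p ∉ PySem.Set.ofList pre := fun hx => hm ((PySem.Set.mem_ofList pre p).1 hx)
      have hadd : PySem.Set.add (PySem.Set.ofList pre) p = PySem.Set.ofList pre ++ [p] := by
        simp [PySem.Set.add, hmem]
      have hcont : PySem.Dict.contains (⟨pvIdx (PySem.Set.ofList pre) 0⟩ : PySem.Dict String Int) p = false := by
        rw [pvIdx_contains]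
        simpa using hmem
      have hlenval : PySem.Set.len (PySem.Set.ofList pre) = ((PySem.Set.ofList pre).length : Int) := rfl
      have hins : PySem.Dict.insert (⟨pvIdx (PySem.Set.ofList pre) 0⟩ : PySem.Dict String Int) p
            (PySem.Set.len (PySem.Set.ofList pre))
          = ⟨pvIdx (PySem.Set.ofList pre ++ [p]) 0⟩ := by
        simp only [PySem.Dict.insert, hcont, Bool.false_eq_true, if_false, hlenval]
        rw [pvIdx_append_singleton]
        norm_num
      rw [hslice, hc, if_pos rfl, hins]
      have := ih (pre ++ [p]) hparsed
      rw [hofl, hadd] at this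
      rw [← hlen1] at this
      exact this

-- ===== VERDICT (by name: the statement is the Claim_ definition above) =====
theorem gen_image_id_eval_py_spec : Claim_equal_gen_image_id_eval_py := by
  intro anno _ _
  show gen_image_id_eval_py anno = gen_image_id_eval_py_alt anno
  unfold gen_image_id_eval_py gen_image_id_eval_py_alt
  have hmap :
      (anno.foldl
        (fun (st : PySem.Dict String Int × Int) ann =>
          let img_id := pvParse ann
          if ((PySem.Dict.keys st.1).contains img_id) = false then
            (PySem.Dict.insert st.1 img_id st.2, st.2 + 1)
          else st)
        (⟨[]⟩, 0))
      = ((anno.map pvParse).foldl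
          (fun (st : PySem.Dict String Int × Int) id =>
            if ((PySem.Dict.keys st.1).contains id) = false then
              (PySem.Dict.insert st.1 id st.2, st.2 + 1)
            else st)
          (⟨[]⟩, 0)) :=
    (List.foldl_map (f := pvParse)
      (g := fun (st : PySem.Dict String Int × Int) id =>
        if ((PySem.Dict.keys st.1).contains id) = false then
          (PySem.Dict.insert st.1 id st.2, st.2 + 1)
        else st)
      (l := anno) (init := (⟨[]⟩, 0))).symm
  rw [hmap]
  have hA : ((anno.map pvParse).foldl
          (fun (st : PySem.Dict String Int × Int) id =>
            if ((PySem.Dict.keys st.1).contains id) = false then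
              (PySem.Dict.insert st.1 id st.2, st.2 + 1)
            else st)
          (⟨pvIdx [] 0⟩, ((List.length ([] : List String) : Nat) : Int))).1.items
      = pvIdx (PySem.Set.update [] (anno.map pvParse)) 0 := by rw [pvLoop]
  rw [show ((⟨[]⟩, 0) : PySem.Dict String Int × Int)
        = (⟨pvIdx [] 0⟩, ((List.length ([] : List String) : Nat) : Int)) from rfl, hA,
      PySem.Set.update_nil_left]
  have hB := pvLoopB (anno.map pvParse) [] (anno.map pvParse) (by simp)
  exact (congrArg PySem.Dict.items hB).symm
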